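-- pv_equiv track=rewrite | github.com/qxl0/Leetcode-p2 | 3393-make-string-anti-palindrome/make-string-anti-palindrome.py | makeAntiPalindrome
-- ===== SOURCE A (Python) =====
-- def makeAntiPalindrome(s: str) -> str:
--     n = len(s)
--     ans = sorted(ch for ch in s)
--     i=j=n//2
--     while j<n and ans[j]==ans[i]:
--         j += 1
--     while ans[i]==ans[n-1-i]:
--         if j==n: return "-1"
--         ans[i],ans[j]=ans[j],ans[i]
--         i+=1
--         j+=1
--
--     return "".join(ans)
-- ===== SOURCE B (Python) =====
-- def makeAntiPalindrome(s: str) -> str: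
--     n = len(s)
--     cnt = [s.count(chr(code)) for code in range(128)]
--     ans = list("".join(chr(code) * cnt[code] for code in range(128)))
--     m = n // 2
--     c = ans[m]
--     lo = sum(cnt[:ord(c)])
--     j0 = lo + cnt[ord(c)]
--     k = m - lo + n % 2
--     if k > n - j0:
--         return "-1"
--     for t in range(k):
--         ans[m + t], ans[j0 + t] = ans[j0 + t], ans[m + t]
--     return "".join(ans)
-- ===== Notes on version B (the rewrite author's own statement) =====
-- stated objective: alternative
-- what changed: Replaces the comparison sort plus two scanning/swapping while-loops by a counting sort over the 128-code ASCII alphabet and a closed-form computation (from the character counts) of the swap block's start and length, followed by one bounded swap pass; Pre_ excludes the empty string, on which both A and B raise IndexError.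
import Mathlib
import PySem

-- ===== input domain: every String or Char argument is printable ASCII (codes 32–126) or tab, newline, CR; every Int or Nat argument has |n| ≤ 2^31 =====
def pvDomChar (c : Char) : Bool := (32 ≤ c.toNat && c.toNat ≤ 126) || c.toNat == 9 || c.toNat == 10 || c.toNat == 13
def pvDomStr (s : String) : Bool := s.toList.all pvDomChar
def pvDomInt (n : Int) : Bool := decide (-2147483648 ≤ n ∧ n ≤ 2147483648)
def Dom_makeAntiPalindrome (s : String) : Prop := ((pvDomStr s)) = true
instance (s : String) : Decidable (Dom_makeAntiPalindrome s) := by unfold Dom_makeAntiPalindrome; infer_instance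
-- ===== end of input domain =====

-- B replaces A's comparison sort and scanning/swapping while-loops by a 128-code counting sort
-- and a closed-form (count-derived) swap block followed by one bounded swap pass (a different
-- algorithm of similar cost). Pre_ excludes the empty string, on which A (and B) raise IndexError.
-- All indices are Nat and, on Pre_ inputs, in range, so List.getD is exact for Python's indexing there.

-- ===== PORT A =====
-- first while loop: advance j while j < n and ans[j] == ans[i]  (i is fixed in this loop)
def aLoop1 (l : List Char) (n i j : Nat) : Nat :=
  if _h : j < n ∧ l.getD j ' ' = l.getD i ' ' then aLoop1 l n i (j + 1) else j
termination_by n - j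
decreasing_by omega

-- ans[i], ans[j] = ans[j], ans[i]
def aSwap (l : List Char) (i j : Nat) : List Char :=
  (l.set i (l.getD j ' ')).set j (l.getD i ' ')

-- second while loop; fuel is a totality guard only (n+1 is always enough: j grows each
-- iteration and the loop returns when j = n)
def aLoop2 (fuel : Nat) (l : List Char) (n i j : Nat) : String :=
  match fuel with
  | 0 => "-1"
  | fuel + 1 =>
    if l.getD i ' ' = l.getD (n - 1 - i) ' ' then
      if j = n then "-1"
      else aLoop2 fuel (aSwap l i j) n (i + 1) (j + 1)
    else String.ofList l

def makeAntiPalindrome (s : String) : String :=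
  let n := s.toList.length
  let ans := PySem.List.sorted s.toList (fun x => x) false
  let j := aLoop1 ans n (n / 2) (n / 2)
  aLoop2 (n + 1) ans n (n / 2) j

-- ===== PORT B =====
-- cnt = [s.count(chr(code)) for code in range(128)]  (single-char substring count = char count)
def bCounts (cs : List Char) : List Nat :=
  (List.range 128).map (fun code => cs.count (Char.ofNat code))

-- ans = list("".join(chr(code) * cnt[code] for code in range(128)))
def bBuild (cnt : List Nat) : List Char :=
  (List.range 128).flatMap (fun code => List.replicate (cnt.getD code 0) (Char.ofNat code))

-- for t in range(k): ans[m+t], ans[j0+t] = ans[j0+t], ans[m+t]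
def bSwapPass (l : List Char) (m j0 k : Nat) : List Char :=
  match k with
  | 0 => l
  | k + 1 =>
    bSwapPass ((l.set m (l.getD j0 ' ')).set j0 (l.getD m ' ')) (m + 1) (j0 + 1) k

def makeAntiPalindrome_alt (s : String) : String :=
  let cs := s.toList
  let n := cs.length
  let cnt := bCounts cs
  let ans := bBuild cnt
  let m := n / 2
  let c := ans.getD m ' '
  let lo := (cnt.take c.toNat).sum
  let j0 := lo + cnt.getD c.toNat 0
  let k := m - lo + n % 2
  if n - j0 < k then "-1"
  else String.ofList (bSwapPass ans m j0 k)

-- ===== PRECONDITION & SPEC =====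
-- Pre_ excludes only the empty string: there A evaluates ans[0] on an empty list (IndexError),
-- and B likewise fails on ans[0].
def Pre_makeAntiPalindrome (s : String) : Prop := s ≠ ""
instance (s : String) : Decidable (Pre_makeAntiPalindrome s) := by unfold Pre_makeAntiPalindrome; infer_instance
def pvWitness_makeAntiPalindrome : String := "aabb"

def Spec_makeAntiPalindrome (s : String) (out : String) : Prop := out = makeAntiPalindrome_alt s
instance (s : String) (out : String) : Decidable (Spec_makeAntiPalindrome s out) := by unfold Spec_makeAntiPalindrome; infer_instance

-- ===== CLAIM (what is proved, stated in full; the proofs are below) =====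
def Claim_equal_makeAntiPalindrome : Prop := ∀ (s : String), Dom_makeAntiPalindrome s → Pre_makeAntiPalindrome s → Spec_makeAntiPalindrome s (makeAntiPalindrome s)

-- ===== LEMMAS AND PROOFS =====

theorem charLe (a b : Char) : a ≤ b ↔ a.toNat ≤ b.toNat := by
  rw [Char.le_def]; exact UInt32.le_iff_toNat_le ..

theorem charLt (a b : Char) : a < b ↔ a.toNat < b.toNat := by
  rw [Char.lt_def]; exact UInt32.lt_iff_toNat_lt ..

theorem toNat_ofNat128 {n : Nat} (h : n < 128) : (Char.ofNat n).toNat = n := by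
  rw [Char.toNat_ofNat]
  have : n.isValidChar := Or.inl (by omega)
  simp [this]

theorem eq_ofNat_iff {x : Char} {k : Nat} (hk : k < 128) : (x = Char.ofNat k) ↔ x.toNat = k := by
  constructor
  · rintro rfl; exact toNat_ofNat128 hk
  · intro h; rw [← h, Char.ofNat_toNat]

theorem bBuild_pairwise (cnt : List Nat) : (bBuild cnt).Pairwise (· ≤ ·) := by
  unfold bBuild
  rw [List.pairwise_flatMap]
  constructor
  · intro a _; exact List.pairwise_replicate.mpr (Or.inr le_rfl)
  · have h : (List.range 128).Pairwise (· < ·) := List.pairwise_lt_range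
    refine h.imp_of_mem ?_
    intro a b ha hb hab x hx y hy
    rw [List.eq_of_mem_replicate hx, List.eq_of_mem_replicate hy, charLe,
      toNat_ofNat128 (List.mem_range.mp ha), toNat_ofNat128 (List.mem_range.mp hb)]
    omega

theorem bBuild_count (cs : List Char) (hdom : ∀ ch ∈ cs, ch.toNat < 128) (x : Char) :
    (bBuild (bCounts cs)).count x = cs.count x := by
  unfold bBuild bCounts
  rw [List.count_flatMap]
  by_cases hx : x.toNat < 128
  · have key : ∀ k ∈ List.range 128,
        (List.count x ∘ fun code => List.replicate (((List.range 128).map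
          (fun code => cs.count (Char.ofNat code))).getD code 0) (Char.ofNat code)) k
        = if k = x.toNat then cs.count x else 0 := by
      intro k hk
      have hk' : k < 128 := List.mem_range.mp hk
      simp only [Function.comp_apply, List.count_replicate]
      rw [List.getD_eq_getElem _ _ (by simpa using hk')]
      rw [List.getElem_map]
      simp only [List.getElem_range]
      by_cases hkx : k = x.toNat
      · subst hkx
        rw [Char.ofNat_toNat]
        simp
      · have hne : Char.ofNat k ≠ x := by
          intro h
          exact hkx (((eq_ofNat_iff hk').mp h.symm).symm)
        simp [hne, hkx]
    rw [List.map_congr_left key]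
    rw [show ((List.range 128).map (fun k => if k = x.toNat then cs.count x else 0)).sum
         = ∑ i ∈ Finset.range 128, (if i = x.toNat then cs.count x else 0) from rfl]
    rw [Finset.sum_ite_eq' (Finset.range 128) x.toNat (fun _ => cs.count x)]
    simp [hx]
  · have h1 : ∀ k ∈ List.range 128,
        (List.count x ∘ fun code => List.replicate (((List.range 128).map
          (fun code => cs.count (Char.ofNat code))).getD code 0) (Char.ofNat code)) k = 0 := by
      intro k hk
      have hk' : k < 128 := List.mem_range.mp hk
      simp only [Function.comp_apply, List.count_replicate]
      have hne : Char.ofNat k ≠ x := by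
        intro h
        have := toNat_ofNat128 hk'
        rw [h] at this
        omega
      simp [hne]
    rw [List.map_congr_left h1]
    have h2 : cs.count x = 0 := by
      rw [List.count_eq_zero]
      intro hmem
      exact absurd (hdom x hmem) (by omega)
    simp [h2]


theorem bBuild_perm (cs : List Char) (hdom : ∀ ch ∈ cs, ch.toNat < 128) :
    (bBuild (bCounts cs)).Perm cs :=
  List.perm_iff_count.mpr (fun x => bBuild_count cs hdom x)

theorem sort_eq (cs : List Char) (hdom : ∀ ch ∈ cs, ch.toNat < 128) :
    PySem.List.sorted cs (fun x => x) false = bBuild (bCounts cs) :=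
  PySem.List.sorted_id_eq_of_perm_of_pairwise cs _ (bBuild_perm cs hdom) (bBuild_pairwise _)

theorem countP_split {α : Type} (l : List α) (p q r : α → Bool)
    (h : ∀ x, r x = (p x || q x)) (hd : ∀ x, ¬(p x = true ∧ q x = true)) :
    l.countP r = l.countP p + l.countP q := by
  induction l with
  | nil => simp
  | cons a t ih =>
    have := h a
    have := hd a
    simp only [List.countP_cons, ih]
    cases hp : p a <;> cases hq : q a <;> simp_all <;> omega

theorem count_eq_countP_toNat (cs : List Char) {k : Nat} (hk : k < 128) :
    cs.count (Char.ofNat k) = cs.countP (fun x => decide (x.toNat = k)) := by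
  rw [List.count_eq_countP]
  apply List.countP_congr
  intro x _
  simp only [beq_iff_eq, decide_eq_true_eq]
  rw [eq_ofNat_iff hk]

theorem bCounts_take_sum (cs : List Char) {k : Nat} (hk : k ≤ 128) :
    ((bCounts cs).take k).sum = cs.countP (fun x => decide (x.toNat < k)) := by
  unfold bCounts
  rw [← List.map_take, List.take_range]
  have hmin : min k 128 = k := by omega
  rw [hmin]
  induction k with
  | zero => simp
  | succ k ih =>
    rw [List.range_succ, List.map_append, List.sum_append]
    rw [ih (by omega) (by omega)]
    have hsplit : cs.countP (fun x => decide (x.toNat < k + 1))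
        = cs.countP (fun x => decide (x.toNat < k)) + cs.countP (fun x => decide (x.toNat = k)) := by
      apply countP_split
      · intro x; rw [Bool.eq_iff_iff]; simp only [Bool.or_eq_true, decide_eq_true_eq]; omega
      · intro x; simp only [decide_eq_true_eq]; omega
    rw [hsplit, ← count_eq_countP_toNat cs (show k < 128 by omega)]
    simp

theorem bCounts_getD (cs : List Char) {k : Nat} (hk : k < 128) :
    (bCounts cs).getD k 0 = cs.count (Char.ofNat k) := by
  unfold bCounts
  rw [List.getD_eq_getElem _ _ (by simpa using hk), List.getElem_map, List.getElem_range]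

theorem sorted_pred_iff {p : Char → Bool} (hmono : ∀ x y : Char, x ≤ y → p y = true → p x = true) :
    ∀ (l : List Char), l.Pairwise (· ≤ ·) → ∀ q (hq : q < l.length),
      (p l[q] = true ↔ q < l.countP p) := by
  intro l
  induction l with
  | nil => intro _ q hq; simp at hq
  | cons a t ih =>
    intro hl q hq
    have ha := (List.pairwise_cons.mp hl).1
    have ht := (List.pairwise_cons.mp hl).2
    rw [List.countP_cons]
    cases hp : p a with
    | true =>
      match q with
      | 0 => simp [hp]
      | q + 1 =>
        simp only [List.getElem_cons_succ]
        rw [ih ht q (by simpa using hq)]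
        simp only [if_true]
        omega
    | false =>
      have hz : t.countP p = 0 := by
        rw [List.countP_eq_zero]
        intro y hy hpy
        rw [hmono a y (ha y hy) hpy] at hp
        exact Bool.noConfusion hp
      match q with
      | 0 => simp [hp, hz]
      | q + 1 =>
        have hq' : q < t.length := by simpa using hq
        simp only [List.getElem_cons_succ, hz]
        have hfalse : p (t[q]'hq') = false := by
          by_contra hc
          have hth : p (t[q]'hq') = true := by revert hc; cases p (t[q]'hq') <;> simp
          rw [hmono a (t[q]'hq') (ha _ (t.getElem_mem _)) hth] at hp
          exact Bool.noConfusion hp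
        simp [hfalse]

theorem sorted_lt_iff {l : List Char} (hl : l.Pairwise (· ≤ ·)) {c : Char} {q : Nat}
    (hq : q < l.length) : l[q] < c ↔ q < l.countP (fun x => decide (x < c)) := by
  have := sorted_pred_iff (p := fun x => decide (x < c))
    (fun x y hxy hp => by simp only [decide_eq_true_eq] at *; exact lt_of_le_of_lt hxy hp)
    l hl q hq
  simpa using this

theorem sorted_le_iff {l : List Char} (hl : l.Pairwise (· ≤ ·)) {c : Char} {q : Nat}
    (hq : q < l.length) : l[q] ≤ c ↔ q < l.countP (fun x => decide (x ≤ c)) := by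
  have := sorted_pred_iff (p := fun x => decide (x ≤ c))
    (fun x y hxy hp => by simp only [decide_eq_true_eq] at *; exact le_trans hxy hp)
    l hl q hq
  simpa using this

theorem countP_le_eq {l : List Char} {c : Char} :
    l.countP (fun x => decide (x ≤ c)) = l.countP (fun x => decide (x < c)) + l.count c := by
  rw [List.count_eq_countP]
  apply countP_split
  · intro x
    rw [Bool.eq_iff_iff]
    simp only [Bool.or_eq_true, decide_eq_true_eq, beq_iff_eq]
    exact le_iff_lt_or_eq
  · intro x
    simp only [decide_eq_true_eq, beq_iff_eq]
    rintro ⟨h1, rfl⟩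
    exact lt_irrefl _ h1

theorem sorted_eq_iff {l : List Char} (hl : l.Pairwise (· ≤ ·)) {c : Char} {q : Nat}
    (hq : q < l.length) :
    l[q] = c ↔ l.countP (fun x => decide (x < c)) ≤ q ∧
      q < l.countP (fun x => decide (x < c)) + l.count c := by
  have h1 := sorted_lt_iff hl (c := c) hq
  have h2 := sorted_le_iff hl (c := c) hq
  rw [countP_le_eq] at h2
  constructor
  · intro h
    rw [h] at h1 h2
    have hn : ¬ l.countP (fun x => decide (x < c)) > q :=
      fun hc => absurd (h1.mpr hc) (lt_irrefl c)
    have hy := h2.mp (le_refl c)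
    omega
  · intro ⟨ha, hb⟩
    have hnlt : ¬ l[q] < c := fun hc => absurd (h1.mp hc) (by omega)
    have hle : l[q] ≤ c := h2.mpr (by omega)
    exact le_antisymm hle (not_lt.mp hnlt)


theorem getD_set_set (l : List Char) (a b : Char) (m j0 : Nat) (hm : m < l.length)
    (hj : j0 < l.length) (hne : m ≠ j0) (p : Nat) (d : Char) :
    ((l.set m a).set j0 b).getD p d = if p = j0 then b else if p = m then a else l.getD p d := by
  rcases Nat.lt_or_ge p l.length with hp | hp
  · rw [List.getD_eq_getElem _ _ (by simpa using hp), List.getD_eq_getElem _ _ hp]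
    rw [List.getElem_set, List.getElem_set]
    split_ifs <;> first | rfl | omega
  · have h1 : p ≠ j0 := by omega
    have h2 : p ≠ m := by omega
    rw [List.getD_eq_default _ _ (by simpa using hp), List.getD_eq_default _ _ hp]
    simp [h1, h2]


theorem bSwapPass_getD :
    ∀ (t : Nat) (l : List Char) (m j0 : Nat) (c : Char), m < j0 → j0 + t ≤ l.length →
    (∀ p, m ≤ p → p < j0 → l.getD p ' ' = c) → ∀ p, p < l.length →
    (bSwapPass l m j0 t).getD p ' ' =
      if m ≤ p ∧ p < m + t then l.getD (j0 + (p - m)) ' '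
      else if j0 ≤ p ∧ p < j0 + t then c
      else l.getD p ' ' := by
  intro t
  induction t with
  | zero =>
    intro l m j0 c _ _ _ p _
    simp [bSwapPass]
    split_ifs <;> first | omega | rfl
  | succ t ih =>
    intro l m j0 c hmj hlen hmid p hp
    have hm : m < l.length := by omega
    have hj : j0 < l.length := by omega
    have hset := getD_set_set l (l.getD j0 ' ') (l.getD m ' ') m j0 hm hj (by omega)
    have hlen' : (((l.set m (l.getD j0 ' ')).set j0 (l.getD m ' '))).length = l.length := by simp
    have hmid' : ∀ q, m + 1 ≤ q → q < j0 + 1 → ((l.set m (l.getD j0 ' ')).set j0 (l.getD m ' ')).getD q ' ' = c := by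
      intro q h1 h2
      rw [hset q ' ']
      rcases Nat.lt_or_ge q j0 with h | h
      · have hq1 : q ≠ j0 := by omega
        have hq2 : q ≠ m := by omega
        simp only [hq1, hq2, if_false]
        exact hmid q (by omega) h
      · have hq1 : q = j0 := by omega
        simp only [hq1, if_true]
        exact hmid m (by omega) hmj
    rw [bSwapPass]
    rw [ih _ (m+1) (j0+1) c (by omega) (by omega : j0 + 1 + t ≤ _ ) hmid' p (by omega)]
    by_cases c1 : m + 1 ≤ p ∧ p < m + 1 + t
    · rw [if_pos c1]
      have e1 : j0 + 1 + (p - (m+1)) = j0 + (p - m) := by omega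
      rw [e1, hset]
      rw [if_neg (show ¬ (j0 + (p-m) = j0) by omega), if_neg (show ¬ (j0 + (p-m) = m) by omega)]
      rw [if_pos (show m ≤ p ∧ p < m + (t+1) by omega)]
    · rw [if_neg c1]
      by_cases c2 : j0 + 1 ≤ p ∧ p < j0 + 1 + t
      · rw [if_pos c2, if_neg (show ¬ (m ≤ p ∧ p < m + (t+1)) by omega),
          if_pos (show j0 ≤ p ∧ p < j0 + (t+1) by omega)]
      · rw [if_neg c2, hset]
        by_cases c4 : p = j0
        · rw [if_pos c4, if_neg (show ¬ (m ≤ p ∧ p < m + (t+1)) by omega),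
            if_pos (show j0 ≤ p ∧ p < j0 + (t+1) by omega)]
          exact hmid m (by omega) hmj
        · rw [if_neg c4]
          by_cases c3 : p = m
          · rw [if_pos c3, if_pos (show m ≤ p ∧ p < m + (t+1) by omega), c3]
            congr 1
            omega
          · rw [if_neg c3, if_neg (show ¬ (m ≤ p ∧ p < m + (t+1)) by omega),
              if_neg (show ¬ (j0 ≤ p ∧ p < j0 + (t+1)) by omega)]




theorem bSwapPass_succ_right :
    ∀ (t : Nat) (l : List Char) (m j0 : Nat),
      bSwapPass l m j0 (t + 1) = aSwap (bSwapPass l m j0 t) (m + t) (j0 + t) := by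
  intro t
  induction t with
  | zero =>
    intro l m j0
    simp [bSwapPass, aSwap]
  | succ t ih =>
    intro l m j0
    show bSwapPass _ (m+1) (j0+1) (t+1) = _
    rw [ih]
    show _ = aSwap (bSwapPass _ (m+1) (j0+1) t) _ _
    congr 1 <;> omega

theorem aLoop1_eq (l : List Char) (c : Char) (m lo run : Nat)
    (hl : l.Pairwise (· ≤ ·))
    (hlo : lo = l.countP (fun x => decide (x < c)))
    (hrun : run = l.count c)
    (hm : m < l.length) (hc : l.getD m ' ' = c) :
    ∀ j, lo ≤ j → j ≤ lo + run → aLoop1 l l.length m j = lo + run := by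
  have hj0n : lo + run ≤ l.length := by
    rw [hlo, hrun, ← countP_le_eq]
    exact List.countP_le_length
  have key : ∀ d j, lo + run - j = d → lo ≤ j → j ≤ lo + run →
      aLoop1 l l.length m j = lo + run := by
    intro d
    induction d with
    | zero =>
      intro j hd h1 h2
      have hj : j = lo + run := by omega
      subst hj
      rw [aLoop1]
      rw [dif_neg]
      rintro ⟨hlt, heq⟩
      rw [List.getD_eq_getElem _ _ hlt, hc] at heq
      have := (sorted_eq_iff hl (c := c) hlt).mp heq
      rw [← hlo, ← hrun] at this
      omega
    | succ d ih =>
      intro j hd h1 h2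
      have hjlt : j < lo + run := by omega
      have hjn : j < l.length := by omega
      rw [aLoop1, dif_pos]
      · exact ih (j+1) (by omega) (by omega) (by omega)
      · refine ⟨hjn, ?_⟩
        rw [List.getD_eq_getElem _ _ hjn, hc]
        exact (sorted_eq_iff hl (c := c) hjn).mpr (by rw [← hlo, ← hrun]; omega)
  intro j h1 h2
  exact key (lo + run - j) j rfl h1 h2

theorem swp_keep (l : List Char) (c : Char) (m lo j0 : Nat)
    (hmj0 : m < j0) (hmid : ∀ p, m ≤ p → p < j0 → l.getD p ' ' = c)
    (t q : Nat) (ht : j0 + t ≤ l.length) (hq : q < m) :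
    (bSwapPass l m j0 t).getD q ' ' = l.getD q ' ' := by
  rw [bSwapPass_getD t l m j0 c hmj0 ht hmid q (by omega)]
  rw [if_neg (by omega), if_neg (by omega)]

theorem swp_high (l : List Char) (c : Char) (m lo j0 : Nat)
    (hlom : lo ≤ m) (hmj0 : m < j0) (hmid : ∀ p, m ≤ p → p < j0 → l.getD p ' ' = c)
    (t : Nat) (ht : j0 + t ≤ l.length) :
    (bSwapPass l m j0 t).getD (m + t) ' ' = c := by
  rw [bSwapPass_getD t l m j0 c hmj0 ht hmid (m + t) (by omega)]
  rw [if_neg (by omega)]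
  by_cases h : j0 ≤ m + t
  · rw [if_pos ⟨h, by omega⟩]
  · rw [if_neg (by omega)]
    exact hmid (m + t) (by omega) (by omega)

theorem swpCondTrue (l : List Char) (c : Char) (m lo run j0 K n : Nat)
    (hl : l.Pairwise (· ≤ ·)) (hn : n = l.length)
    (hpar : n = 2 * m + n % 2) (hpar2 : n % 2 < 2)
    (hlo : lo = l.countP (fun x => decide (x < c)))
    (hrun : run = l.count c) (hj0 : j0 = lo + run)
    (hK : K = m - lo + n % 2)
    (hlom : lo ≤ m) (hmj0 : m < j0) (hj0n : j0 ≤ n)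
    (hmid : ∀ p, m ≤ p → p < j0 → l.getD p ' ' = c)
    (t : Nat) (ht1 : j0 + t ≤ n) (ht2 : t < K) :
    (bSwapPass l m j0 t).getD (m + t) ' ' = (bSwapPass l m j0 t).getD (n - 1 - (m + t)) ' ' := by
  rw [swp_high l c m lo j0 hlom hmj0 hmid t (by omega)]
  set q := n - 1 - (m + t) with hq
  rcases Nat.lt_or_ge q m with hqm | hqm
  · rw [swp_keep l c m lo j0 hmj0 hmid t q (by omega) hqm]
    have hqn : q < l.length := by omega
    rw [List.getD_eq_getElem _ _ hqn]
    exact ((sorted_eq_iff hl (c := c) hqn).mpr (by rw [← hlo, ← hrun]; omega)).symm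
  · -- q ≥ m only when t = 0 and n odd, q = m
    have hq0 : q = m ∧ t = 0 := by omega
    rw [hq0.1, hq0.2]
    show _ = (bSwapPass l m j0 0).getD m ' '
    rw [show bSwapPass l m j0 0 = l from rfl]
    exact (hmid m (by omega) hmj0).symm

theorem swpCondFalse (l : List Char) (c : Char) (m lo run j0 K n : Nat)
    (hl : l.Pairwise (· ≤ ·)) (hn : n = l.length)
    (hpar : n = 2 * m + n % 2) (hpar2 : n % 2 < 2)
    (hlo : lo = l.countP (fun x => decide (x < c)))
    (hrun : run = l.count c) (hj0 : j0 = lo + run)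
    (hK : K = m - lo + n % 2)
    (hlom : lo ≤ m) (hmj0 : m < j0) (hj0n : j0 ≤ n)
    (hmid : ∀ p, m ≤ p → p < j0 → l.getD p ' ' = c)
    (hKn : K ≤ n - j0) :
    ¬ ((bSwapPass l m j0 K).getD (m + K) ' ' = (bSwapPass l m j0 K).getD (n - 1 - (m + K)) ' ') := by
  have hlo1 : 1 ≤ lo := by omega
  have hqval : n - 1 - (m + K) = lo - 1 := by omega
  rw [swp_high l c m lo j0 hlom hmj0 hmid K (by omega), hqval]
  rw [swp_keep l c m lo j0 hmj0 hmid K (lo - 1) (by omega) (by omega)]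
  have hlt : l.getD (lo - 1) ' ' < c := by
    have hln : lo - 1 < l.length := by omega
    rw [List.getD_eq_getElem _ _ hln]
    exact (sorted_lt_iff hl (c := c) hln).mpr (by omega)
  exact fun h => absurd (h ▸ hlt) (lt_irrefl c)

theorem aLoop2_success (l : List Char) (c : Char) (m lo run j0 K n : Nat)
    (hl : l.Pairwise (· ≤ ·)) (hn : n = l.length)
    (hpar : n = 2 * m + n % 2) (hpar2 : n % 2 < 2)
    (hlo : lo = l.countP (fun x => decide (x < c)))
    (hrun : run = l.count c) (hj0 : j0 = lo + run)
    (hK : K = m - lo + n % 2)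
    (hlom : lo ≤ m) (hmj0 : m < j0) (hj0n : j0 ≤ n)
    (hmid : ∀ p, m ≤ p → p < j0 → l.getD p ' ' = c)
    (hKn : K ≤ n - j0) :
    ∀ d t, t ≤ K → K - t ≤ d →
      aLoop2 (d + 1) (bSwapPass l m j0 t) n (m + t) (j0 + t)
        = String.ofList (bSwapPass l m j0 K) := by
  intro d
  induction d with
  | zero =>
    intro t ht hd
    have htK : t = K := by omega
    rw [htK]
    rw [aLoop2, if_neg (swpCondFalse l c m lo run j0 K n hl hn hpar hpar2 hlo hrun hj0 hK
      hlom hmj0 hj0n hmid hKn)]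
  | succ d ih =>
    intro t ht hd
    rcases Nat.lt_or_ge t K with htK | htK
    · rw [aLoop2, if_pos (swpCondTrue l c m lo run j0 K n hl hn hpar hpar2 hlo hrun hj0 hK
        hlom hmj0 hj0n hmid t (by omega) htK)]
      rw [if_neg (show ¬ (j0 + t = n) by omega)]
      have hstep : aSwap (bSwapPass l m j0 t) (m + t) (j0 + t) = bSwapPass l m j0 (t + 1) :=
        (bSwapPass_succ_right t l m j0).symm
      rw [hstep]
      have := ih (t + 1) (by omega) (by omega)
      rw [show m + t + 1 = m + (t + 1) by omega, show j0 + t + 1 = j0 + (t + 1) by omega]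
      exact this
    · have htK' : t = K := by omega
      rw [htK']
      rw [aLoop2, if_neg (swpCondFalse l c m lo run j0 K n hl hn hpar hpar2 hlo hrun hj0 hK
        hlom hmj0 hj0n hmid hKn)]

theorem aLoop2_fail (l : List Char) (c : Char) (m lo run j0 K n : Nat)
    (hl : l.Pairwise (· ≤ ·)) (hn : n = l.length)
    (hpar : n = 2 * m + n % 2) (hpar2 : n % 2 < 2)
    (hlo : lo = l.countP (fun x => decide (x < c)))
    (hrun : run = l.count c) (hj0 : j0 = lo + run)
    (hK : K = m - lo + n % 2)
    (hlom : lo ≤ m) (hmj0 : m < j0) (hj0n : j0 ≤ n)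
    (hmid : ∀ p, m ≤ p → p < j0 → l.getD p ' ' = c)
    (hKn : n - j0 < K) :
    ∀ d t, t ≤ n - j0 → (n - j0) - t ≤ d →
      aLoop2 (d + 1) (bSwapPass l m j0 t) n (m + t) (j0 + t) = "-1" := by
  intro d
  induction d with
  | zero =>
    intro t ht hd
    have htn : t = n - j0 := by omega
    rw [aLoop2, if_pos (swpCondTrue l c m lo run j0 K n hl hn hpar hpar2 hlo hrun hj0 hK
      hlom hmj0 hj0n hmid t (by omega) (by omega))]
    rw [if_pos (show j0 + t = n by omega)]
  | succ d ih =>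
    intro t ht hd
    rw [aLoop2, if_pos (swpCondTrue l c m lo run j0 K n hl hn hpar hpar2 hlo hrun hj0 hK
      hlom hmj0 hj0n hmid t (by omega) (by omega))]
    rcases Nat.lt_or_ge t (n - j0) with htn | htn
    · rw [if_neg (show ¬ (j0 + t = n) by omega)]
      rw [(bSwapPass_succ_right t l m j0).symm]
      have := ih (t + 1) (by omega) (by omega)
      rw [show m + t + 1 = m + (t + 1) by omega, show j0 + t + 1 = j0 + (t + 1) by omega]
      exact this
    · rw [if_pos (show j0 + t = n by omega)]

theorem makeAntiPalindrome_main (s : String) (hd : Dom_makeAntiPalindrome s)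
    (hp : Pre_makeAntiPalindrome s) : makeAntiPalindrome s = makeAntiPalindrome_alt s := by
  have hdom : ∀ ch ∈ s.toList, ch.toNat < 128 := by
    intro ch hch
    have h1 := List.all_eq_true.mp hd ch hch
    unfold pvDomChar at h1
    simp only [Bool.or_eq_true, Bool.and_eq_true, decide_eq_true_eq, beq_iff_eq] at h1
    omega
  have hne : s.toList ≠ [] := by
    intro h
    exact hp (by
      have := congrArg String.ofList h
      simpa using this)
  simp only [makeAntiPalindrome, makeAntiPalindrome_alt]
  set cs := s.toList with hcs
  set n := cs.length with hn'
  have hn1 : 1 ≤ n := by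
    have := List.length_pos_of_ne_nil hne
    omega
  rw [sort_eq cs hdom]
  set L := bBuild (bCounts cs) with hL
  have hperm : L.Perm cs := bBuild_perm cs hdom
  have hlenL : L.length = n := hperm.length_eq
  have hl : L.Pairwise (· ≤ ·) := bBuild_pairwise _
  set m := n / 2 with hm'
  have hm : m < n := by omega
  have hmL : m < L.length := by omega
  set c := L.getD m ' ' with hc'
  have hc : L[m]'hmL = c := (List.getD_eq_getElem L ' ' hmL).symm
  set lo := L.countP (fun x => decide (x < c)) with hlo
  set run := L.count c with hrun
  have heqm := (sorted_eq_iff hl (c := c) hmL).mp hc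
  rw [← hlo, ← hrun] at heqm
  have hlom : lo ≤ m := heqm.1
  have hmj0 : m < lo + run := heqm.2
  have hj0n : lo + run ≤ n := by
    rw [← hlenL, hlo, hrun, ← countP_le_eq]
    exact List.countP_le_length
  have hmid : ∀ p, m ≤ p → p < lo + run → L.getD p ' ' = c := by
    intro p h1 h2
    have hpL : p < L.length := by omega
    rw [List.getD_eq_getElem _ _ hpL]
    exact (sorted_eq_iff hl (c := c) hpL).mpr ⟨by rw [← hlo]; omega, by rw [← hlo, ← hrun]; omega⟩
  have hpar : n = 2 * m + n % 2 := by omega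
  have hpar2 : n % 2 < 2 := by omega
  have hc128 : c.toNat < 128 := by
    have hcmem : c ∈ cs := hperm.mem_iff.mp (hc ▸ L.getElem_mem hmL)
    exact hdom c hcmem
  -- B-side count expressions
  have hloB : ((bCounts cs).take c.toNat).sum = lo := by
    rw [bCounts_take_sum cs (by omega : c.toNat ≤ 128)]
    rw [hlo, ← hperm.countP_eq]
    apply List.countP_congr
    intro x _
    simp only [decide_eq_true_eq]
    exact (charLt x c).symm
  have hcntB : (bCounts cs).getD c.toNat 0 = run := by
    rw [bCounts_getD cs hc128, Char.ofNat_toNat, hrun, ← hperm.count_eq]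
  rw [hloB, hcntB]
  -- A's first loop
  have e1 : aLoop1 L n m m = lo + run := by
    rw [show n = L.length from hlenL.symm]
    exact aLoop1_eq L c m lo run hl hlo hrun hmL hc' m hlom (by omega)
  rw [e1]
  by_cases hbr : n - (lo + run) < m - lo + n % 2
  · rw [if_pos hbr]
    have := aLoop2_fail L c m lo run (lo + run) (m - lo + n % 2) n hl hlenL.symm hpar hpar2
      hlo hrun rfl rfl hlom hmj0 hj0n hmid hbr n 0 (by omega) (by omega)
    simpa using this
  · rw [if_neg hbr]
    have := aLoop2_success L c m lo run (lo + run) (m - lo + n % 2) n hl hlenL.symm hpar hpar2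
      hlo hrun rfl rfl hlom hmj0 hj0n hmid (by omega) n 0 (by omega) (by omega)
    simpa using this

-- ===== VERDICT (by name: the statement is the Claim_ definition above) =====
theorem makeAntiPalindrome_spec : Claim_equal_makeAntiPalindrome := by
  intro s hd hp
  exact (makeAntiPalindrome_main s hd hp).symm ▸ rfl
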